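-- pv_equiv track=rewrite | github.com/FinchWilliam/DS-Final-Project | notebooks/model_functions.py | recommend_ingredients_pairwise
-- ===== SOURCE A (Python) =====
-- def recommend_ingredients_pairwise(ingredient, pair_counts, top_n=5):
--     recommendations = []
--     for pair, count in pair_counts.items():
--         if ingredient in pair:
--             other_ingredient = pair[0] if pair[1] == ingredient else pair[1]
--             recommendations.append((other_ingredient, count))
--     recommendations.sort(key = lambda x: x[1], reverse = True)
--     return [item[0] for item in recommendations[:top_n]]
-- ===== SOURCE B (Python) =====
-- def recommend_ingredients_pairwise(ingredient, pair_counts, top_n=5):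
--     occurrences = [(count, pair[0] if pair[1] == ingredient else pair[1])
--                    for pair, count in pair_counts.items() if ingredient in pair]
--     buckets = {}
--     for count, other in occurrences:
--         buckets[count] = buckets.get(count, []) + [other]
--     result = []
--     for count in sorted(buckets, reverse=True):
--         result += buckets[count]
--     return result[:top_n]
-- ===== Notes on version B (the rewrite author's own statement) =====
-- stated objective: alternative
-- what changed: Replaces the flat sort of all (other, count) pairs by a count-indexed bucket table: matches are grouped into buckets[count] in one pass, the distinct counts are sorted descending, and the buckets are concatenated in that order before slicing to top_n. Pre_ excludes association lists with duplicate pair keys (a Python dict collapses those, so such a list does not represent the dict A receives) and pairs of length < 2 containing the ingredient (A raises IndexError there).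
import Mathlib
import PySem

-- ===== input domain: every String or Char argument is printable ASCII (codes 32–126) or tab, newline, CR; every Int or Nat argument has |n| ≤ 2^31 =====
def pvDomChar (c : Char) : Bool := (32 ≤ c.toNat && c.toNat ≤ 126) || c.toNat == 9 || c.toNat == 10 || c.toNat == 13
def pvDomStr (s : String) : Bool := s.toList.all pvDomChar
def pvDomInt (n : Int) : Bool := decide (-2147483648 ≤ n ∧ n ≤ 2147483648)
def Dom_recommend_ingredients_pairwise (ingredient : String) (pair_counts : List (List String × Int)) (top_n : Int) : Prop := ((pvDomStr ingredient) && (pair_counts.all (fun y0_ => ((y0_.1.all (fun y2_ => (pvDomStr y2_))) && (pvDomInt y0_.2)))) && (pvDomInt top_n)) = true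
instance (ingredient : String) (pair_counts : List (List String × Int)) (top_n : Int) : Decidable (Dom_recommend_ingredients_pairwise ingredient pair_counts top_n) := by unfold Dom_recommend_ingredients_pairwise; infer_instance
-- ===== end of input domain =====

-- B replaces A's flat stable sort of (other, count) pairs by a count-indexed bucket table whose
-- buckets are concatenated in descending count order (alternative decomposition, same result).

-- shared expression helper: `pair[0] if pair[1] == ingredient else pair[1]` (Python indexing via pyGet?;
-- the "" default is only reached outside Pre_, where Python raises IndexError)
def pvOther (ingredient : String) (pair : List String) : String :=
  if (PySem.List.pyGet? pair 1).getD "" == ingredient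
  then (PySem.List.pyGet? pair 0).getD ""
  else (PySem.List.pyGet? pair 1).getD ""

-- ===== PORT A =====
def recommend_ingredients_pairwise (ingredient : String) (pair_counts : List (List String × Int)) (top_n : Int) : List String :=
  let recommendations :=
    pair_counts.foldl (fun acc pc =>
      if pc.1.contains ingredient then acc ++ [(pvOther ingredient pc.1, pc.2)] else acc)
      ([] : List (String × Int))
  let sortedRecs := PySem.List.sorted recommendations (fun x => x.2) true
  (PySem.List.slice sortedRecs none (some top_n)).map (fun item => item.1)

-- ===== PORT B =====
def recommend_ingredients_pairwise_alt (ingredient : String) (pair_counts : List (List String × Int)) (top_n : Int) : List String :=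
  let occurrences :=
    (pair_counts.filter (fun pc => pc.1.contains ingredient)).map
      (fun pc => (pc.2, pvOther ingredient pc.1))
  let buckets :=
    occurrences.foldl (fun d p => d.modify p.1 [] (fun x => x ++ [p.2]))
      (PySem.Dict.empty : PySem.Dict Int (List String))
  let result :=
    (PySem.List.sorted buckets.keys (fun c => c) true).foldl
      (fun acc c => acc ++ buckets.getD c []) []
  PySem.List.slice result none (some top_n)

-- ===== PRECONDITION & SPEC =====
-- Pre_ excludes association lists with duplicate pair keys (a Python dict collapses those, so such a
-- list does not represent the dict A receives) and pairs of length < 2 containing the ingredient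
-- (A raises IndexError there).
def Pre_recommend_ingredients_pairwise (ingredient : String) (pair_counts : List (List String × Int)) (top_n : Int) : Prop :=
  (∀ pc ∈ pair_counts, ingredient ∈ pc.1 → 2 ≤ pc.1.length) ∧
  (pair_counts.map (fun pc => pc.1)).Nodup
instance (ingredient : String) (pair_counts : List (List String × Int)) (top_n : Int) : Decidable (Pre_recommend_ingredients_pairwise ingredient pair_counts top_n) := by unfold Pre_recommend_ingredients_pairwise; infer_instance
def pvWitness_recommend_ingredients_pairwise : String × (List (List String × Int)) × Int :=
  ("a", [(["a", "b"], 2), (["b", "c"], 3), (["a", "c"], 1), (["a", "d"], 2)], 3)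
def Spec_recommend_ingredients_pairwise (ingredient : String) (pair_counts : List (List String × Int)) (top_n : Int) (out : List String) : Prop := out = recommend_ingredients_pairwise_alt ingredient pair_counts top_n
instance (ingredient : String) (pair_counts : List (List String × Int)) (top_n : Int) (out : List String) : Decidable (Spec_recommend_ingredients_pairwise ingredient pair_counts top_n out) := by unfold Spec_recommend_ingredients_pairwise; infer_instance

-- ===== CLAIM (what is proved, stated in full; the proofs are below) =====
def Claim_equal_recommend_ingredients_pairwise : Prop := ∀ (ingredient : String) (pair_counts : List (List String × Int)) (top_n : Int), Dom_recommend_ingredients_pairwise ingredient pair_counts top_n → Pre_recommend_ingredients_pairwise ingredient pair_counts top_n → Spec_recommend_ingredients_pairwise ingredient pair_counts top_n (recommend_ingredients_pairwise ingredient pair_counts top_n)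

-- ===== LEMMAS AND PROOFS =====

theorem pv_insertBy_nil {α : Type} (before : α → α → Bool) (x : α) :
    PySem.List.insertBy before x [] = [x] := by
  simp [PySem.List.insertBy]

theorem pv_insertBy_cons {α : Type} (before : α → α → Bool) (x y : α) (ys : List α) :
    PySem.List.insertBy before x (y :: ys) =
      if before x y then x :: y :: ys else y :: PySem.List.insertBy before x ys := by
  simp [PySem.List.insertBy]

theorem pv_insertBy_append_not_before {α : Type} (before : α → α → Bool) (x : α)
    (ys zs : List α) (h : ∀ y ∈ ys, before x y = false) :
    PySem.List.insertBy before x (ys ++ zs) = ys ++ PySem.List.insertBy before x zs := by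
  induction ys with
  | nil => simp
  | cons y ys ih =>
      have hy : before x y = false := h y (by simp)
      simp [pv_insertBy_cons, hy, ih (fun z hz => h z (by simp [hz]))]

theorem pv_insertBy_all_before {α : Type} (before : α → α → Bool) (x : α)
    (ys : List α) (h : ∀ y ∈ ys, before x y = true) :
    PySem.List.insertBy before x ys = x :: ys := by
  cases ys with
  | nil => simp [pv_insertBy_nil]
  | cons y ys => simp [pv_insertBy_cons, h y (by simp)]

theorem pv_mem_flat_snd (cs : List Int) (l : List (String × Int)) (y : String × Int)
    (hy : y ∈ cs.flatMap (fun c => l.filter (fun q => q.2 == c))) : y.2 ∈ cs := by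
  simp only [List.mem_flatMap, List.mem_filter] at hy
  obtain ⟨c, hc, _, he⟩ := hy
  simpa [beq_iff_eq.mp he] using hc

theorem pv_insert_flat (cs : List Int) (hps : cs.Pairwise (· > ·)) (r : String × Int)
    (hr : r.2 ∈ cs) (l : List (String × Int)) :
    PySem.List.insertBy (fun a b => decide ((b : String × Int).2 < a.2)) r
        (cs.flatMap (fun c => l.filter (fun q => q.2 == c)))
      = cs.flatMap (fun c => (l ++ [r]).filter (fun q => q.2 == c)) := by
  induction cs with
  | nil => simp at hr
  | cons c cs ih =>
      have hgt : ∀ c' ∈ cs, c' < c := fun c' hc' => List.rel_of_pairwise_cons hps hc'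
      simp only [List.flatMap_cons, List.filter_append]
      by_cases hc : r.2 = c
      · have h1 : ∀ y ∈ l.filter (fun q => q.2 == c),
            (fun a b => decide ((b : String × Int).2 < a.2)) r y = false := by
          intro y hy
          have : y.2 = c := beq_iff_eq.mp (List.mem_filter.mp hy).2
          simp [this, hc]
        rw [pv_insertBy_append_not_before _ _ _ _ h1]
        have h2 : ∀ y ∈ cs.flatMap (fun c => l.filter (fun q => q.2 == c)),
            (fun a b => decide ((b : String × Int).2 < a.2)) r y = true := by
          intro y hy
          have := hgt y.2 (pv_mem_flat_snd cs l y hy)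
          simp [hc]; omega
        rw [pv_insertBy_all_before _ _ _ h2]
        have h3 : List.filter (fun q => q.2 == c) [r] = [r] := by simp [hc]
        have h4 : ∀ c' ∈ cs,
            List.filter (fun q => q.2 == c') ([r] : List (String × Int)) = [] := by
          intro c' hc'
          have := hgt c' hc'
          simp; omega
        rw [h3]
        have h5 : (cs.flatMap fun c' => l.filter (fun q => q.2 == c') ++ List.filter (fun q => q.2 == c') [r])
            = cs.flatMap (fun c' => l.filter (fun q => q.2 == c')) := by
          apply List.flatMap_congr
          intro c' hc'
          simp [h4 c' hc']
        rw [h5]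
        simp
      · have hr' : r.2 ∈ cs := by
          rcases List.mem_cons.mp hr with h | h
          · exact absurd h hc
          · exact h
        have h1 : ∀ y ∈ l.filter (fun q => q.2 == c),
            (fun a b => decide ((b : String × Int).2 < a.2)) r y = false := by
          intro y hy
          have hyc : y.2 = c := beq_iff_eq.mp (List.mem_filter.mp hy).2
          have := hgt r.2 hr'
          simp [hyc]; omega
        rw [pv_insertBy_append_not_before _ _ _ _ h1]
        have h3 : List.filter (fun q => q.2 == c) ([r] : List (String × Int)) = [] := by
          simp [hc]
        rw [h3, ih (List.Pairwise.of_cons hps) hr']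
        simp


theorem pv_foldl_insert_flat (cs : List Int) (hps : cs.Pairwise (· > ·)) :
    ∀ (l2 l1 : List (String × Int)), (∀ r ∈ l2, r.2 ∈ cs) →
    List.foldl (fun acc x => PySem.List.insertBy (fun a b => decide ((b : String × Int).2 < a.2)) x acc)
        (cs.flatMap (fun c => l1.filter (fun q => q.2 == c))) l2
      = cs.flatMap (fun c => (l1 ++ l2).filter (fun q => q.2 == c)) := by
  intro l2
  induction l2 with
  | nil => intro l1 _; simp
  | cons r l2 ih =>
      intro l1 hmem
      simp only [List.foldl_cons]
      rw [pv_insert_flat cs hps r (hmem r (by simp)) l1]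
      have := ih (l1 ++ [r]) (fun q hq => hmem q (by simp [hq]))
      simpa using this

theorem pv_sorted_rev_eq_flatMap (l : List (String × Int)) (cs : List Int)
    (hps : cs.Pairwise (· > ·)) (hmem : ∀ r ∈ l, r.2 ∈ cs) :
    PySem.List.sorted l (fun x => x.2) true
      = cs.flatMap (fun c => l.filter (fun q => q.2 == c)) := by
  rw [PySem.List.sorted_rev_eq_foldl_insertBy]
  have h := pv_foldl_insert_flat cs hps l [] hmem
  have hz : cs.flatMap (fun _ => ([] : List (String × Int))) = [] := by simp
  simp only [List.filter_nil, List.nil_append, hz] at h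
  exact h

theorem pv_map_slice {α β : Type} (f : α → β) (xs : List α) (b : Int) :
    (PySem.List.slice xs none (some b)).map f
      = PySem.List.slice (xs.map f) none (some b) := by
  simp [PySem.List.slice, PySem.List.clampIdx]

theorem recommend_ingredients_pairwise_spec' (ingredient : String)
    (pair_counts : List (List String × Int)) (top_n : Int) :
    recommend_ingredients_pairwise ingredient pair_counts top_n
      = recommend_ingredients_pairwise_alt ingredient pair_counts top_n := by
  unfold recommend_ingredients_pairwise recommend_ingredients_pairwise_alt
  simp only [PySem.List.foldl_append_if, List.nil_append]
  set fl := pair_counts.filter (fun pc => pc.1.contains ingredient) with hfl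
  set recs := fl.map (fun pc => (pvOther ingredient pc.1, pc.2)) with hrecs
  set occ := fl.map (fun pc => (pc.2, pvOther ingredient pc.1)) with hocc
  set buckets := occ.foldl (fun d p => d.modify p.1 [] (fun x => x ++ [p.2]))
      (PySem.Dict.empty : PySem.Dict Int (List String)) with hbuck
  -- keys of the bucket dict
  have hkeys : buckets.keys = PySem.Set.ofList (occ.map (fun p => p.1)) := by
    rw [hbuck]
    rw [PySem.Dict.keys_foldl_modify_key occ (fun p => p.1) [] (fun _ p x => x ++ [p.2])]
    simp [PySem.Set.ofList_eq_foldl, PySem.Set.update]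
  set cs := PySem.List.sorted buckets.keys (fun c => c) true with hcs
  -- cs is strictly decreasing
  have hnodup : cs.Nodup := by
    have hperm : cs.Perm buckets.keys := PySem.List.sorted_perm _ _ _
    have : buckets.keys.Nodup := by
      rw [hkeys]; exact PySem.Set.nodup_ofList _
    exact hperm.symm.nodup this
  have hle : cs.Pairwise (fun a b => b ≤ a) := PySem.List.sorted_pairwise_rev _ _
  have hps : cs.Pairwise (· > ·) := by
    have := hle.and (List.Pairwise.imp (fun h => h) hnodup)
    exact this.imp (fun ⟨h1, h2⟩ => lt_of_le_of_ne h1 (Ne.symm h2))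
  -- every count in recs is in cs
  have hmem : ∀ r ∈ recs, r.2 ∈ cs := by
    intro r hr
    rw [hrecs] at hr
    obtain ⟨pc, hpc, rfl⟩ := List.mem_map.mp hr
    rw [hcs, PySem.List.mem_sorted, hkeys, PySem.Set.mem_ofList]
    rw [hocc]
    simp only [List.map_map, List.mem_map]
    exact ⟨pc, hpc, rfl⟩
  -- bucket contents
  have hget : ∀ c : Int, buckets.getD c []
      = (recs.filter (fun q => q.2 == c)).map (fun q => q.1) := by
    intro c
    rw [hbuck, PySem.Dict.getD_foldl_modify_append]
    rw [hocc, hrecs]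
    simp [List.filter_map, List.map_map, Function.comp_def]
  -- assemble
  rw [PySem.List.foldl_append_eq_flatMap, List.nil_append]
  rw [pv_sorted_rev_eq_flatMap recs cs hps hmem]
  rw [pv_map_slice]
  congr 1
  rw [List.map_flatMap]
  apply List.flatMap_congr
  intro c _
  rw [hget c]

-- ===== VERDICT (by name: the statement is the Claim_ definition above) =====
theorem recommend_ingredients_pairwise_spec : Claim_equal_recommend_ingredients_pairwise := by
  intro ingredient pair_counts top_n _ _
  exact recommend_ingredients_pairwise_spec' ingredient pair_counts top_n
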